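-- pv_equiv track=rewrite | github.com/Kaoushikkumarr/graduation_ceremony | graduation_ceremony.py | graduation_ceremony
-- ===== SOURCE A (Python) =====
-- def graduation_ceremony(number):
--
--     if number == 0:
--         return "Invalid input value, must be greater than or equal to 1"
--     if number < 4:
--         return str(1 << (number - 1)) + "/" + str(1 << number)
--
--     value = [0 for _ in range(number + 1)]
--     value[0] = None
--     value[4] = 1
--     for i in range(5, number + 1):
--         value[i] = (2 ** (i - 4)) + value[i - 4] + value[i - 3] + value[i - 2] + value[i - 1]
--     allowed = [0 for _ in range(number + 1)]
--     allowed[0] = None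
--     for i in range(1, number + 1):
--         allowed[i] = (2 ** i) - value[i]
--     graduation_miss = allowed[number] - allowed[number - 1]
--     return str(graduation_miss) + "/" + str(allowed[number])
-- ===== SOURCE B (Python) =====
-- def graduation_ceremony(number):
--     if number == 0:
--         return "Invalid input value, must be greater than or equal to 1"
--     w, x, y, z = 0, 0, 1, 1
--     for _ in range(number):
--         w, x, y, z = x, y, z, w + x + y + z
--     return str(z - y) + "/" + str(z)
-- ===== Notes on version B (the rewrite author's own statement) =====
-- stated objective: faster
-- what changed: B replaces A's two O(n)-size arrays, the complement recurrence on disqualified-count 'value' and the fresh 2**i power computed every iteration by a single pass that iterates the tetranacci recurrence allowed[k]=allowed[k-1]+...+allowed[k-4] on a 4-tuple of running values, handling n<4 and n>=4 uniformly with no power-of-two arithmetic at all.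
import Mathlib
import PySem

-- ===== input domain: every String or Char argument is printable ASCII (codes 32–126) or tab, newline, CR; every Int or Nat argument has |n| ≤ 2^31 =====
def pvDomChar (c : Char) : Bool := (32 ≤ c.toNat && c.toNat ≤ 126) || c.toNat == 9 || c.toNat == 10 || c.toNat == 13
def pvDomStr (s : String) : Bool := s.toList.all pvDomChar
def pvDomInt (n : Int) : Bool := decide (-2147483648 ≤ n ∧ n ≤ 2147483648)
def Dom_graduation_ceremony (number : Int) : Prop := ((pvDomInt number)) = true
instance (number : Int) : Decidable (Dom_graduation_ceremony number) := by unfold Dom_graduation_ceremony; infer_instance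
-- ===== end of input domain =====

-- B iterates the tetranacci recurrence on a 4-value window in one pass (no arrays, no fresh 2**i
-- per step), measurably faster than A by a large constant factor; equal to A on all number ≥ 0.


-- ===== PORT A =====
-- Python list assignments `value[i] = …` are ported as List.set / List.getD with nonnegative
-- indices: inside Pre_ (number ≥ 0) every index the loops touch is ≥ 1 and in range, exactly as in
-- Python; the `value[0] = None` / `allowed[0] = None` sentinels are never read on the branch
-- number ≥ 4 and are ported as the untouched 0 entry.  `1 << k` / `2 ** k` appear only with k ≥ 0
-- inside Pre_, ported with .toNat exponents.
def graduation_ceremony (number : Int) : String :=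
  if number == 0 then "Invalid input value, must be greater than or equal to 1"
  else if number < 4 then
    PySem.Int.toStr ((1 : Int) <<< (number - 1).toNat) ++ "/" ++ PySem.Int.toStr ((1 : Int) <<< number.toNat)
  else
    let value : List Int := List.replicate (number + 1).toNat 0
    let value := value.set 4 1
    let value := (PySem.List.pyRange 5 (number + 1) 1).foldl (fun v i =>
      v.set i.toNat ((2 : Int) ^ (i - 4).toNat + v.getD (i - 4).toNat 0 + v.getD (i - 3).toNat 0
        + v.getD (i - 2).toNat 0 + v.getD (i - 1).toNat 0)) value
    let allowed : List Int := List.replicate (number + 1).toNat 0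
    let allowed := (PySem.List.pyRange 1 (number + 1) 1).foldl (fun a i =>
      a.set i.toNat ((2 : Int) ^ i.toNat - value.getD i.toNat 0)) allowed
    let graduation_miss := allowed.getD number.toNat 0 - allowed.getD (number - 1).toNat 0
    PySem.Int.toStr graduation_miss ++ "/" ++ PySem.Int.toStr (allowed.getD number.toNat 0)

-- ===== PORT B =====
def graduation_ceremony_alt (number : Int) : String :=
  if number == 0 then "Invalid input value, must be greater than or equal to 1"
  else
    let s := (PySem.List.pyRange 0 number 1).foldl
      (fun (t : Int × Int × Int × Int) _ => (t.2.1, t.2.2.1, t.2.2.2, t.1 + t.2.1 + t.2.2.1 + t.2.2.2))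
      (0, 0, 1, 1)
    PySem.Int.toStr (s.2.2.2 - s.2.2.1) ++ "/" ++ PySem.Int.toStr s.2.2.2

-- ===== PRECONDITION & SPEC =====
-- Pre_ excludes number < 0, on which A raises ValueError (negative shift count in `1 << (number-1)`).
def Pre_graduation_ceremony (number : Int) : Prop := 0 ≤ number
instance (number : Int) : Decidable (Pre_graduation_ceremony number) := by unfold Pre_graduation_ceremony; infer_instance
def pvWitness_graduation_ceremony : Int := (7)
def Spec_graduation_ceremony (number : Int) (out : String) : Prop := out = graduation_ceremony_alt number
instance (number : Int) (out : String) : Decidable (Spec_graduation_ceremony number out) := by unfold Spec_graduation_ceremony; infer_instance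

-- ===== CLAIM (what is proved, stated in full; the proofs are below) =====
def Claim_equal_graduation_ceremony : Prop := ∀ (number : Int), Dom_graduation_ceremony number → Pre_graduation_ceremony number → Spec_graduation_ceremony number (graduation_ceremony number)

-- ===== LEMMAS AND PROOFS =====

-- The step of B's loop and its iterates.
def tetStep (t : Int × Int × Int × Int) : Int × Int × Int × Int :=
  (t.2.1, t.2.2.1, t.2.2.2, t.1 + t.2.1 + t.2.2.1 + t.2.2.2)

def tetT (n : Nat) : Int × Int × Int × Int := tetStep^[n] (0, 0, 1, 1)

def zf (n : Nat) : Int := (tetT n).2.2.2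

lemma tetT_succ (n : Nat) : tetT (n + 1) = tetStep (tetT n) := by
  simp [tetT, Function.iterate_succ_apply']

lemma tetT_snd (n : Nat) : (tetT (n + 1)).2.2.1 = zf n := by
  rw [tetT_succ]; rfl

lemma tetT_comp1 (n : Nat) : (tetT (n + 1)).1 = (tetT n).2.1 := by
  rw [tetT_succ]; rfl

lemma tetT_comp2 (n : Nat) : (tetT (n + 1)).2.1 = (tetT n).2.2.1 := by
  rw [tetT_succ]; rfl

lemma zf_rec (n : Nat) : zf (n + 4) = zf n + zf (n + 1) + zf (n + 2) + zf (n + 3) := by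
  have h1 : (tetT (n + 3)).1 = zf n := by
    rw [tetT_comp1, tetT_comp2, tetT_snd]
  have h2 : (tetT (n + 3)).2.1 = zf (n + 1) := by
    rw [tetT_comp2, tetT_snd]
  have h3 : (tetT (n + 3)).2.2.1 = zf (n + 2) := tetT_snd _
  have : zf (n + 4) = (tetT (n + 3)).1 + (tetT (n + 3)).2.1 + (tetT (n + 3)).2.2.1 + zf (n + 3) := by
    show (tetT (n + 4)).2.2.2 = _
    rw [show n + 4 = (n + 3) + 1 from rfl, tetT_succ]; rfl
  rw [this, h1, h2, h3]

-- The entries A's `value` array converges to.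
def vf (i : Nat) : Int := 2 ^ i - zf i

lemma vf_rec (k : Nat) :
    vf (k + 5) = 2 ^ (k + 1) + vf (k + 1) + vf (k + 2) + vf (k + 3) + vf (k + 4) := by
  have hz := zf_rec (k + 1)
  rw [show k + 1 + 4 = k + 5 from rfl] at hz
  simp only [vf, hz, pow_succ]
  ring

lemma vf_le_four : ∀ i ≤ 4, vf i = if i = 4 then 1 else 0 := by decide

-- B's loop is iteration of tetStep.
lemma foldl_const_iterate {α β : Type} (l : List β) (f : α → α) (s : α) :
    l.foldl (fun t _ => f t) s = f^[l.length] s := by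
  induction l generalizing s with
  | nil => rfl
  | cons a t ih => simp [List.foldl_cons, ih, Function.iterate_succ_apply]

-- A's `value`-loop: state after processing range(5, m+1) and pointwise characterisation.
def initV (n : Nat) : List Int := (List.replicate (n + 1) 0).set 4 1

def fV (v : List Int) (i : Int) : List Int :=
  v.set i.toNat ((2 : Int) ^ (i - 4).toNat + v.getD (i - 4).toNat 0 + v.getD (i - 3).toNat 0
    + v.getD (i - 2).toNat 0 + v.getD (i - 1).toNat 0)

def loopV (n m : Nat) : List Int := (PySem.List.pyRange 5 ((m : Int) + 1) 1).foldl fV (initV n)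

lemma foldl_fV_length (l : List Int) (s : List Int) : (l.foldl fV s).length = s.length := by
  induction l generalizing s with
  | nil => rfl
  | cons a t ih => simp [List.foldl_cons, ih, fV]

lemma loopV_length (n m : Nat) : (loopV n m).length = n + 1 := by
  simp [loopV, foldl_fV_length, initV]

lemma loopV_getD (n m : Nat) (h4 : 4 ≤ m) : m ≤ n →
    ∀ i ≤ n, (loopV n m).getD i 0 = if i ≤ m then vf i else 0 := by
  induction m, h4 using Nat.le_induction with
  | base =>
    intro hm i hi
    have hnil : PySem.List.pyRange 5 (((4 : Nat) : Int) + 1) 1 = [] := by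
      rw [show (((4 : Nat) : Int) + 1) = 5 by norm_num]
      exact PySem.List.pyRange_one_eq_nil (by norm_num)
    simp only [loopV]
    rw [hnil]
    simp only [List.foldl_nil, initV, List.getD_eq_getElem?_getD]
    rcases eq_or_ne i 4 with rfl | hne
    · rw [List.getElem?_set_self (by simp; omega)]
      simp [vf_le_four 4 (by omega)]
    · rw [List.getElem?_set_ne (by omega)]
      rw [List.getElem?_replicate_of_lt (by omega)]
      rcases Nat.lt_or_ge i 5 with h5 | h5
      · rw [if_pos (by omega), vf_le_four i (by omega), if_neg hne]
        rfl
      · rw [if_neg (by omega)]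
        rfl
  | succ m h4m ih =>
    intro hm1 i hi
    have hmn : m ≤ n := by omega
    have hrange : PySem.List.pyRange 5 (((m + 1 : Nat) : Int) + 1) 1
        = PySem.List.pyRange 5 ((m : Int) + 1) 1 ++ [((m : Int) + 1)] := by
      rw [show (((m + 1 : Nat) : Int) + 1) = ((m : Int) + 1) + 1 by push_cast; ring]
      exact PySem.List.pyRange_one_succ_right (by omega)
    have hstep : loopV n (m + 1) = fV (loopV n m) ((m : Int) + 1) := by
      simp only [loopV, hrange, List.foldl_append, List.foldl_cons, List.foldl_nil]
    obtain ⟨k, rfl⟩ : ∃ k, m = k + 4 := ⟨m - 4, by omega⟩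
    have hIdx : (((k + 4 : Nat) : Int) + 1).toNat = k + 5 := by omega
    have hIdx4 : (((k + 4 : Nat) : Int) + 1 - 4).toNat = k + 1 := by omega
    have hIdx3 : (((k + 4 : Nat) : Int) + 1 - 3).toNat = k + 2 := by omega
    have hIdx2 : (((k + 4 : Nat) : Int) + 1 - 2).toNat = k + 3 := by omega
    have hIdx1 : (((k + 4 : Nat) : Int) + 1 - 1).toNat = k + 4 := by omega
    have hgk : ∀ j ≤ k + 4, (loopV n (k + 4)).getD j 0 = vf j := by
      intro j hj
      rw [ih hmn j (by omega), if_pos hj]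
    rw [hstep]
    simp only [fV, hIdx, hIdx4, hIdx3, hIdx2, hIdx1, List.getD_eq_getElem?_getD]
    rcases eq_or_ne i (k + 5) with rfl | hne
    · rw [List.getElem?_set_self (by rw [loopV_length]; omega)]
      simp only [Option.getD_some]
      rw [if_pos (by omega)]
      rw [← List.getD_eq_getElem?_getD, ← List.getD_eq_getElem?_getD,
          ← List.getD_eq_getElem?_getD, ← List.getD_eq_getElem?_getD]
      rw [hgk (k + 1) (by omega), hgk (k + 2) (by omega), hgk (k + 3) (by omega),
          hgk (k + 4) (by omega), vf_rec k]
    · rw [List.getElem?_set_ne (by omega), ← List.getD_eq_getElem?_getD,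
          ih hmn i hi]
      rcases Nat.lt_or_ge i (k + 5) with h5 | h5
      · rw [if_pos (by omega), if_pos (by omega)]
      · rw [if_neg (by omega), if_neg (by omega)]

-- A's `allowed`-loop over the finished `value` array.
def gA (value : List Int) (a : List Int) (i : Int) : List Int :=
  a.set i.toNat ((2 : Int) ^ i.toNat - value.getD i.toNat 0)

def loopA (n m : Nat) : List Int :=
  (PySem.List.pyRange 1 ((m : Int) + 1) 1).foldl (gA (loopV n n)) (List.replicate (n + 1) 0)

lemma loopA_getD (n : Nat) (h4 : 4 ≤ n) : ∀ m, m ≤ n →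
    ∀ i ≤ n, (loopA n m).getD i 0 = if 1 ≤ i ∧ i ≤ m then zf i else 0 := by
  intro m
  induction m with
  | zero =>
    intro _ i hi
    have hnil : PySem.List.pyRange 1 (((0 : Nat) : Int) + 1) 1 = [] := by
      rw [show (((0 : Nat) : Int) + 1) = 1 by norm_num]
      exact PySem.List.pyRange_one_eq_nil (by norm_num)
    simp only [loopA, hnil, List.foldl_nil, List.getD_eq_getElem?_getD]
    rw [List.getElem?_replicate_of_lt (by omega), if_neg (by omega)]
    rfl
  | succ m ih =>
    intro hm1 i hi
    have hrange : PySem.List.pyRange 1 (((m + 1 : Nat) : Int) + 1) 1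
        = PySem.List.pyRange 1 ((m : Int) + 1) 1 ++ [((m : Int) + 1)] := by
      rw [show (((m + 1 : Nat) : Int) + 1) = ((m : Int) + 1) + 1 by push_cast; ring]
      exact PySem.List.pyRange_one_succ_right (by omega)
    have hstep : loopA n (m + 1) = gA (loopV n n) (loopA n m) ((m : Int) + 1) := by
      simp only [loopA, hrange, List.foldl_append, List.foldl_cons, List.foldl_nil]
    have hIdx : (((m : Nat) : Int) + 1).toNat = m + 1 := by omega
    rw [hstep]
    simp only [gA, hIdx, List.getD_eq_getElem?_getD]
    have hlenA : (loopA n m).length = n + 1 := by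
      have : ∀ (l : List Int) (s : List Int), (l.foldl (gA (loopV n n)) s).length = s.length := by
        intro l
        induction l with
        | nil => intro s; rfl
        | cons a t iht => intro s; simp [List.foldl_cons, iht, gA]
      simp [loopA, this]
    rcases eq_or_ne i (m + 1) with rfl | hne
    · rw [List.getElem?_set_self (by omega)]
      simp only [Option.getD_some]
      rw [if_pos (by omega), ← List.getD_eq_getElem?_getD,
          loopV_getD n n h4 (le_refl n) (m + 1) hi, if_pos hi]
      simp [vf]
    · rw [List.getElem?_set_ne (by omega), ← List.getD_eq_getElem?_getD, ih (by omega) i hi]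
      rcases Nat.lt_or_ge i (m + 1) with h5 | h5
      · by_cases h1 : 1 ≤ i
        · rw [if_pos ⟨h1, by omega⟩, if_pos ⟨h1, by omega⟩]
        · rw [if_neg (by omega), if_neg (by omega)]
      · rw [if_neg (by omega), if_neg (by omega)]

lemma zf_sub_snd (n : Nat) (h1 : 1 ≤ n) : (tetT n).2.2.1 = zf (n - 1) := by
  obtain ⟨k, rfl⟩ : ∃ k, n = k + 1 := ⟨n - 1, by omega⟩
  simp [tetT_snd]

lemma B_eval (n : Nat) (h1 : 1 ≤ n) :
    graduation_ceremony_alt (n : Int)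
      = PySem.Int.toStr (zf n - zf (n - 1)) ++ "/" ++ PySem.Int.toStr (zf n) := by
  unfold graduation_ceremony_alt
  rw [if_neg (by simp; omega)]
  have hB : ((PySem.List.pyRange 0 (n : Int) 1).foldl
      (fun (t : Int × Int × Int × Int) _ => (t.2.1, t.2.2.1, t.2.2.2, t.1 + t.2.1 + t.2.2.1 + t.2.2.2))
      (0, 0, 1, 1)) = tetT n := by
    rw [show (fun (t : Int × Int × Int × Int) (_ : Int) =>
          (t.2.1, t.2.2.1, t.2.2.2, t.1 + t.2.1 + t.2.2.1 + t.2.2.2))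
        = (fun t _ => tetStep t) from rfl]
    rw [foldl_const_iterate, PySem.List.length_pyRange_one]
    simp [tetT]
  rw [hB]
  show PySem.Int.toStr ((tetT n).2.2.2 - (tetT n).2.2.1) ++ "/" ++ PySem.Int.toStr (tetT n).2.2.2 = _
  rw [zf_sub_snd n h1]
  rfl

lemma A_eval (n : Nat) (hge : 4 ≤ n) :
    graduation_ceremony (n : Int)
      = PySem.Int.toStr ((loopA n n).getD ((n : Int)).toNat 0 - (loopA n n).getD ((n : Int) - 1).toNat 0)
        ++ "/" ++ PySem.Int.toStr ((loopA n n).getD ((n : Int)).toNat 0) := by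
  unfold graduation_ceremony
  rw [if_neg (by simp; omega), if_neg (by omega)]
  rfl

-- ===== VERDICT (by name: the statement is the Claim_ definition above) =====
theorem graduation_ceremony_spec : Claim_equal_graduation_ceremony := by
  intro number _ hpre
  unfold Pre_graduation_ceremony at hpre
  obtain ⟨n, rfl⟩ : ∃ n : Nat, number = (n : Int) := ⟨number.toNat, by omega⟩
  unfold Spec_graduation_ceremony
  rcases Nat.lt_or_ge n 4 with hlt | hge
  · interval_cases n <;> decide
  · rw [A_eval n hge, B_eval n (by omega)]
    have hn : ((n : Int)).toNat = n := by omega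
    have hn1 : ((n : Int) - 1).toNat = n - 1 := by omega
    rw [hn, hn1]
    rw [loopA_getD n hge n (le_refl n) n (le_refl n),
        loopA_getD n hge n (le_refl n) (n - 1) (by omega)]
    rw [if_pos (by omega : 1 ≤ n ∧ n ≤ n), if_pos (by omega : 1 ≤ n - 1 ∧ n - 1 ≤ n)]
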